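-- pv_equiv track=rewrite | github.com/prakhar-thecoder/db-tools | candidate_key.py | prepare_lmr_matrix
-- ===== SOURCE A (Python) =====
-- def prepare_lmr_matrix(r, fd):
--     lmr = {"l": set(), "m": set(), "r": set()}
--
--     for lhs, rhs in fd:
--         lmr["l"].update(lhs)
--         lmr["r"].update(rhs)
--
--     for lhs, rhs in fd:
--         for attr in lhs:
--             if attr in lmr["r"]:
--                 lmr["m"].add(attr)
--                 lmr["l"].discard(attr)
--                 lmr["r"].discard(attr)
--         for attr in rhs:
--             if attr in lmr["l"]:
--                 lmr["m"].add(attr)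
--                 lmr["l"].discard(attr)
--                 lmr["r"].discard(attr)
--
--     lmr["l"] = sorted(lmr["l"])
--     lmr["m"] = sorted(lmr["m"])
--     lmr["r"] = sorted(lmr["r"])
--
--     return lmr
-- ===== SOURCE B (Python) =====
-- def prepare_lmr_matrix(r, fd):
--     L = set()
--     R = set()
--     for lhs, rhs in fd:
--         L.update(lhs)
--         R.update(rhs)
--     m = L & R
--     return {"l": sorted(L - m), "m": sorted(m), "r": sorted(R - m)}
-- ===== Notes on version B (the rewrite author's own statement) =====
-- stated objective: simpler
-- what changed: A's whole second fd-rescanning loop (which moves attributes into m one by one while mutating l and r in place) is replaced by one set-algebra step: m = L & R, l = L - m, r = R - m, computed directly from the unions built in a single pass.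
import Mathlib
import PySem

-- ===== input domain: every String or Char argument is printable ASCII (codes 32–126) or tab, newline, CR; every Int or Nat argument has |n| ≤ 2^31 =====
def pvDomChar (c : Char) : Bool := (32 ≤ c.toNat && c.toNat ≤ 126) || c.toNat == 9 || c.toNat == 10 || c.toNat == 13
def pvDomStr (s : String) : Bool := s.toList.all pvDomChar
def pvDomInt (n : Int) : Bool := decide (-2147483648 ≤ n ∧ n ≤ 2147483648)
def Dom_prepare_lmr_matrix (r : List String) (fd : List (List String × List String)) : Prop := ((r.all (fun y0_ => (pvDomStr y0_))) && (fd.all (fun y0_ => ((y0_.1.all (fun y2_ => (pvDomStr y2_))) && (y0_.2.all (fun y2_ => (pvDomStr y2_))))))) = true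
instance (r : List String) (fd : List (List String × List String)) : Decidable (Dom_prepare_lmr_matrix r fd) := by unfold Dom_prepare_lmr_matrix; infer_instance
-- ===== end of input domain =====

-- B replaces A's whole second fd-rescanning/mutating loop by one set-algebra step (m = L & R,
-- l = L - m, r = R - m) on the unions built in a single pass; objective: simpler.
-- The Python dict {"l": …, "m": …, "r": …} has three fixed literal keys, so both ports carry its
-- three set values as a triple (l, m, r) and return the three-item association list directly.

-- ===== PORT A =====
-- state of A's dict: (lmr["l"], lmr["m"], lmr["r"])
-- 'lmr["m"].add(attr); lmr["l"].discard(attr); lmr["r"].discard(attr)' on the current state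
def lmrMove (st : PySem.Set String × PySem.Set String × PySem.Set String) (attr : String) :
    PySem.Set String × PySem.Set String × PySem.Set String :=
  (PySem.Set.discard st.1 attr, PySem.Set.add st.2.1 attr, PySem.Set.discard st.2.2 attr)

-- body of 'for attr in lhs: if attr in lmr["r"]: …'
def lmrStepLhs (st : PySem.Set String × PySem.Set String × PySem.Set String) (attr : String) :
    PySem.Set String × PySem.Set String × PySem.Set String :=
  if PySem.Set.contains st.2.2 attr then lmrMove st attr else st

-- body of 'for attr in rhs: if attr in lmr["l"]: …'
def lmrStepRhs (st : PySem.Set String × PySem.Set String × PySem.Set String) (attr : String) :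
    PySem.Set String × PySem.Set String × PySem.Set String :=
  if PySem.Set.contains st.1 attr then lmrMove st attr else st

-- body of the second 'for lhs, rhs in fd' loop: the two inner attr loops
def lmrPair (st : PySem.Set String × PySem.Set String × PySem.Set String)
    (p : List String × List String) : PySem.Set String × PySem.Set String × PySem.Set String :=
  p.2.foldl lmrStepRhs (p.1.foldl lmrStepLhs st)

def prepare_lmr_matrix (r : List String) (fd : List (List String × List String)) :
    List (String × List String) :=
  -- lmr = {"l": set(), "m": set(), "r": set()}
  let lmr0 : PySem.Set String × PySem.Set String × PySem.Set String :=
    (PySem.Set.empty, PySem.Set.empty, PySem.Set.empty)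
  -- first loop: lmr["l"].update(lhs); lmr["r"].update(rhs)
  let lmr1 := fd.foldl
    (fun st p => (PySem.Set.update st.1 p.1, st.2.1, PySem.Set.update st.2.2 p.2)) lmr0
  -- second loop: scan every fd pair again, moving shared attributes into lmr["m"]
  let lmr2 := fd.foldl lmrPair lmr1
  -- lmr["l"] = sorted(…) etc.; the dict's insertion order is l, m, r
  [("l", PySem.List.sorted lmr2.1 (fun x => x) false),
   ("m", PySem.List.sorted lmr2.2.1 (fun x => x) false),
   ("r", PySem.List.sorted lmr2.2.2 (fun x => x) false)]

-- ===== PORT B =====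
def prepare_lmr_matrix_alt (r : List String) (fd : List (List String × List String)) :
    List (String × List String) :=
  -- one pass: L = union of all lhs, R = union of all rhs
  let L := fd.foldl (fun s p => PySem.Set.update s p.1) PySem.Set.empty
  let R := fd.foldl (fun s p => PySem.Set.update s p.2) PySem.Set.empty
  -- m = L & R; l = L - m; r = R - m
  let m := PySem.Set.inter L R
  [("l", PySem.List.sorted (PySem.Set.diff L m) (fun x => x) false),
   ("m", PySem.List.sorted m (fun x => x) false),
   ("r", PySem.List.sorted (PySem.Set.diff R m) (fun x => x) false)]

-- ===== PRECONDITION & SPEC =====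
def Spec_prepare_lmr_matrix (r : List String) (fd : List (List String × List String)) (out : List (String × List String)) : Prop := out = prepare_lmr_matrix_alt r fd
instance (r : List String) (fd : List (List String × List String)) (out : List (String × List String)) : Decidable (Spec_prepare_lmr_matrix r fd out) := by unfold Spec_prepare_lmr_matrix; infer_instance

-- ===== CLAIM (what is proved, stated in full; the proofs are below) =====
def Claim_equal_prepare_lmr_matrix : Prop := ∀ (r : List String) (fd : List (List String × List String)), Dom_prepare_lmr_matrix r fd → Spec_prepare_lmr_matrix r fd (prepare_lmr_matrix r fd)

-- ===== LEMMAS AND PROOFS =====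

-- membership/nodup of the union-building folds (shared shape of A's first loop and B's L/R)
theorem mem_foldl_update {α : Type} (f : α → List String) (l : List α)
    (s : PySem.Set String) (x : String) :
    x ∈ l.foldl (fun s p => PySem.Set.update s (f p)) s ↔ x ∈ s ∨ ∃ p ∈ l, x ∈ f p := by
  induction l generalizing s with
  | nil => simp
  | cons a t ih =>
    simp only [List.foldl_cons, ih, PySem.Set.mem_update, List.mem_cons]
    aesop

theorem nodup_foldl_update {α : Type} (f : α → List String) (l : List α)
    (s : PySem.Set String) (h : s.Nodup) :
    (l.foldl (fun s p => PySem.Set.update s (f p)) s).Nodup := by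
  induction l generalizing s with
  | nil => exact h
  | cons a t ih => exact ih _ (PySem.Set.nodup_update _ _ h)

-- the invariant A's second loop maintains, relative to the fixed unions L and R:
-- l = L \ m and r = R \ m (as sets, with nodup), and m ⊆ L ∩ R
def lmrInv (L R : PySem.Set String)
    (st : PySem.Set String × PySem.Set String × PySem.Set String) : Prop :=
  st.1.Nodup ∧ st.2.1.Nodup ∧ st.2.2.Nodup ∧
  (∀ x, x ∈ st.1 ↔ x ∈ L ∧ x ∉ st.2.1) ∧
  (∀ x, x ∈ st.2.2 ↔ x ∈ R ∧ x ∉ st.2.1) ∧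
  (∀ x ∈ st.2.1, x ∈ L ∧ x ∈ R)

theorem lmrStepLhs_inv (L R : PySem.Set String) (st : PySem.Set String × PySem.Set String × PySem.Set String)
    (attrs : List String) (hA : ∀ a ∈ attrs, a ∈ L) (h : lmrInv L R st) :
    lmrInv L R (attrs.foldl lmrStepLhs st) ∧
    (∀ x, x ∈ (attrs.foldl lmrStepLhs st).2.1 ↔ x ∈ st.2.1 ∨ (x ∈ attrs ∧ x ∈ R)) := by
  induction attrs generalizing st with
  | nil => exact ⟨h, by simp⟩
  | cons a t ih =>
    obtain ⟨h1, h2, h3, hl, hr, hm⟩ := h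
    have haL : a ∈ L := hA a (by simp)
    have key : lmrInv L R (lmrStepLhs st a) ∧
        (∀ x, x ∈ (lmrStepLhs st a).2.1 ↔ x ∈ st.2.1 ∨ (x = a ∧ x ∈ R)) := by
      unfold lmrStepLhs
      by_cases hc : PySem.Set.contains st.2.2 a
      · have haR : a ∈ R ∧ a ∉ st.2.1 := (hr a).mp ((PySem.Set.contains_iff _ _).mp hc)
        rw [if_pos hc]
        simp only [lmrMove, lmrInv]
        refine ⟨⟨PySem.Set.nodup_discard _ _ h1, PySem.Set.nodup_add _ _ h2, PySem.Set.nodup_discard _ _ h3,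
          ?_, ?_, ?_⟩, ?_⟩
        · intro x; simp only [PySem.Set.mem_discard, PySem.Set.mem_add, hl]; tauto
        · intro x; simp only [PySem.Set.mem_discard, PySem.Set.mem_add, hr]; tauto
        · intro x hx
          rcases (PySem.Set.mem_add _ _ _).mp hx with hx | rfl
          · exact hm x hx
          · exact ⟨haL, haR.1⟩
        · intro x; simp only [PySem.Set.mem_add]
          constructor
          · rintro (hx | rfl)
            exacts [Or.inl hx, Or.inr ⟨rfl, haR.1⟩]
          · rintro (hx | ⟨rfl, -⟩)
            exacts [Or.inl hx, Or.inr rfl]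
      · have hna : a ∈ R → a ∈ st.2.1 := by
          intro haR
          by_contra hmem
          exact hc ((PySem.Set.contains_iff _ _).mpr ((hr a).mpr ⟨haR, hmem⟩))
        rw [if_neg hc]
        refine ⟨⟨h1, h2, h3, hl, hr, hm⟩, ?_⟩
        intro x
        constructor
        · intro hx; exact Or.inl hx
        · rintro (hx | ⟨rfl, hxR⟩)
          · exact hx
          · exact hna hxR
    obtain ⟨hinv', hm'⟩ := key
    obtain ⟨hinvf, hmf⟩ := ih (lmrStepLhs st a) (fun b hb => hA b (by simp [hb])) hinv'
    refine ⟨hinvf, ?_⟩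
    intro x
    simp only [List.foldl_cons, hmf, hm', List.mem_cons]
    tauto

theorem lmrStepRhs_inv (L R : PySem.Set String) (st : PySem.Set String × PySem.Set String × PySem.Set String)
    (attrs : List String) (hA : ∀ a ∈ attrs, a ∈ R) (h : lmrInv L R st) :
    lmrInv L R (attrs.foldl lmrStepRhs st) ∧
    (∀ x, x ∈ (attrs.foldl lmrStepRhs st).2.1 ↔ x ∈ st.2.1 ∨ (x ∈ attrs ∧ x ∈ L)) := by
  induction attrs generalizing st with
  | nil => exact ⟨h, by simp⟩
  | cons a t ih =>
    obtain ⟨h1, h2, h3, hl, hr, hm⟩ := h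
    have haR : a ∈ R := hA a (by simp)
    have key : lmrInv L R (lmrStepRhs st a) ∧
        (∀ x, x ∈ (lmrStepRhs st a).2.1 ↔ x ∈ st.2.1 ∨ (x = a ∧ x ∈ L)) := by
      unfold lmrStepRhs
      by_cases hc : PySem.Set.contains st.1 a
      · have haL : a ∈ L ∧ a ∉ st.2.1 := (hl a).mp ((PySem.Set.contains_iff _ _).mp hc)
        rw [if_pos hc]
        simp only [lmrMove, lmrInv]
        refine ⟨⟨PySem.Set.nodup_discard _ _ h1, PySem.Set.nodup_add _ _ h2, PySem.Set.nodup_discard _ _ h3,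
          ?_, ?_, ?_⟩, ?_⟩
        · intro x; simp only [PySem.Set.mem_discard, PySem.Set.mem_add, hl]; tauto
        · intro x; simp only [PySem.Set.mem_discard, PySem.Set.mem_add, hr]; tauto
        · intro x hx
          rcases (PySem.Set.mem_add _ _ _).mp hx with hx | rfl
          · exact hm x hx
          · exact ⟨haL.1, haR⟩
        · intro x; simp only [PySem.Set.mem_add]
          constructor
          · rintro (hx | rfl)
            exacts [Or.inl hx, Or.inr ⟨rfl, haL.1⟩]
          · rintro (hx | ⟨rfl, -⟩)
            exacts [Or.inl hx, Or.inr rfl]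
      · have hna : a ∈ L → a ∈ st.2.1 := by
          intro haL
          by_contra hmem
          exact hc ((PySem.Set.contains_iff _ _).mpr ((hl a).mpr ⟨haL, hmem⟩))
        rw [if_neg hc]
        refine ⟨⟨h1, h2, h3, hl, hr, hm⟩, ?_⟩
        intro x
        constructor
        · intro hx; exact Or.inl hx
        · rintro (hx | ⟨rfl, hxL⟩)
          · exact hx
          · exact hna hxL
    obtain ⟨hinv', hm'⟩ := key
    obtain ⟨hinvf, hmf⟩ := ih (lmrStepRhs st a) (fun b hb => hA b (by simp [hb])) hinv'
    refine ⟨hinvf, ?_⟩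
    intro x
    simp only [List.foldl_cons, hmf, hm', List.mem_cons]
    tauto

theorem lmrPair_fold_inv (L R : PySem.Set String)
    (fd : List (List String × List String))
    (hA : ∀ p ∈ fd, (∀ a ∈ p.1, a ∈ L) ∧ (∀ a ∈ p.2, a ∈ R))
    (st : PySem.Set String × PySem.Set String × PySem.Set String) (h : lmrInv L R st) :
    lmrInv L R (fd.foldl lmrPair st) ∧
    (∀ x, x ∈ (fd.foldl lmrPair st).2.1 ↔
      x ∈ st.2.1 ∨ ∃ p ∈ fd, (x ∈ p.1 ∧ x ∈ R) ∨ (x ∈ p.2 ∧ x ∈ L)) := by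
  induction fd generalizing st with
  | nil => exact ⟨h, by simp⟩
  | cons p t ih =>
    obtain ⟨hp1, hp2⟩ := hA p (by simp)
    obtain ⟨hinv1, hm1⟩ := lmrStepLhs_inv L R st p.1 hp1 h
    obtain ⟨hinv2, hm2⟩ := lmrStepRhs_inv L R _ p.2 hp2 hinv1
    obtain ⟨hinvf, hmf⟩ := ih (fun q hq => hA q (by simp [hq])) (lmrPair st p) hinv2
    refine ⟨hinvf, ?_⟩
    intro x
    simp only [List.foldl_cons, hmf, List.mem_cons]
    have : x ∈ (lmrPair st p).2.1 ↔ x ∈ st.2.1 ∨ (x ∈ p.1 ∧ x ∈ R) ∨ (x ∈ p.2 ∧ x ∈ L) := by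
      unfold lmrPair
      rw [hm2, hm1]
      tauto
    rw [this]
    constructor
    · rintro ((hx | hx | hx) | ⟨q, hq, hx⟩)
      · exact Or.inl hx
      · exact Or.inr ⟨p, Or.inl rfl, Or.inl hx⟩
      · exact Or.inr ⟨p, Or.inl rfl, Or.inr hx⟩
      · exact Or.inr ⟨q, Or.inr hq, hx⟩
    · rintro (hx | ⟨q, (rfl | hq), hx⟩)
      · exact Or.inl (Or.inl hx)
      · exact Or.inl (Or.inr hx)
      · exact Or.inr ⟨q, hq, hx⟩

-- ===== VERDICT (by name: the statement is the Claim_ definition above) =====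
theorem prepare_lmr_matrix_spec : Claim_equal_prepare_lmr_matrix := by
  intro r fd _
  unfold Spec_prepare_lmr_matrix prepare_lmr_matrix prepare_lmr_matrix_alt
  -- split A's first loop (a fold over the triple) into the three independent folds
  set L := fd.foldl (fun s p => PySem.Set.update s p.1) (PySem.Set.empty : PySem.Set String) with hL
  set R := fd.foldl (fun s p => PySem.Set.update s p.2) (PySem.Set.empty : PySem.Set String) with hR
  have hsplit : fd.foldl
      (fun st p => (PySem.Set.update st.1 p.1, st.2.1, PySem.Set.update st.2.2 p.2))
      ((PySem.Set.empty, PySem.Set.empty, PySem.Set.empty) :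
        PySem.Set String × PySem.Set String × PySem.Set String) = (L, PySem.Set.empty, R) := by
    rw [PySem.List.foldl_prod_mk (f := fun s (p : List String × List String) => PySem.Set.update s p.1)
      (g := fun (s : PySem.Set String × PySem.Set String) p => (s.1, PySem.Set.update s.2 p.2))]
    rw [PySem.List.foldl_prod_mk (f := fun (s : PySem.Set String) (_ : List String × List String) => s)
      (g := fun s (p : List String × List String) => PySem.Set.update s p.2)]
    rw [PySem.List.foldl_ignore]
  have hLnd : L.Nodup := nodup_foldl_update _ fd _ List.nodup_nil
  have hRnd : R.Nodup := nodup_foldl_update _ fd _ List.nodup_nil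
  have hLmem : ∀ x, x ∈ L ↔ ∃ p ∈ fd, x ∈ p.1 := by
    intro x; rw [hL, mem_foldl_update]; simp [PySem.Set.empty]
  have hRmem : ∀ x, x ∈ R ↔ ∃ p ∈ fd, x ∈ p.2 := by
    intro x; rw [hR, mem_foldl_update]; simp [PySem.Set.empty]
  have hinv0 : lmrInv L R (L, PySem.Set.empty, R) := by
    refine ⟨hLnd, List.nodup_nil, hRnd, ?_, ?_, ?_⟩ <;> simp [PySem.Set.empty]
  have hAfd : ∀ p ∈ fd, (∀ a ∈ p.1, a ∈ L) ∧ (∀ a ∈ p.2, a ∈ R) := by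
    intro p hp
    exact ⟨fun a ha => (hLmem a).mpr ⟨p, hp, ha⟩, fun a ha => (hRmem a).mpr ⟨p, hp, ha⟩⟩
  obtain ⟨⟨hn1, hn2, hn3, hl, hr, hm⟩, hmfin⟩ :=
    lmrPair_fold_inv L R fd hAfd (L, PySem.Set.empty, R) hinv0
  set st := fd.foldl lmrPair (L, PySem.Set.empty, R) with hst
  -- characterise the three final sets
  have hmchar : ∀ x, x ∈ st.2.1 ↔ x ∈ L ∧ x ∈ R := by
    intro x
    rw [hmfin x]
    constructor
    · rintro (hx | ⟨p, hp, ⟨hx, hxR⟩ | ⟨hx, hxL⟩⟩)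
      · simp [PySem.Set.empty] at hx
      · exact ⟨(hLmem x).mpr ⟨p, hp, hx⟩, hxR⟩
      · exact ⟨hxL, (hRmem x).mpr ⟨p, hp, hx⟩⟩
    · rintro ⟨hxL, hxR⟩
      obtain ⟨p, hp, hx⟩ := (hLmem x).mp hxL
      exact Or.inr ⟨p, hp, Or.inl ⟨hx, hxR⟩⟩
  have hBm : ∀ x, x ∈ PySem.Set.inter L R ↔ x ∈ L ∧ x ∈ R := by
    intro x; exact PySem.Set.mem_inter _ _ _
  -- the three components are permutations of B's sets, hence sort equal
  have pm : st.2.1.Perm (PySem.Set.inter L R) := by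
    rw [List.perm_ext_iff_of_nodup hn2 (PySem.Set.nodup_inter _ _ hLnd)]
    intro x; rw [hmchar x, hBm x]
  have pl : st.1.Perm (PySem.Set.diff L (PySem.Set.inter L R)) := by
    rw [List.perm_ext_iff_of_nodup hn1 (PySem.Set.nodup_diff _ _ hLnd)]
    intro x
    rw [hl x, PySem.Set.mem_diff, hBm x, hmchar x]
  have pr : st.2.2.Perm (PySem.Set.diff R (PySem.Set.inter L R)) := by
    rw [List.perm_ext_iff_of_nodup hn3 (PySem.Set.nodup_diff _ _ hRnd)]
    intro x
    rw [hr x, PySem.Set.mem_diff, hBm x, hmchar x]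
  simp only [hsplit, ← hst]
  rw [(PySem.List.sorted_id_eq_sorted_id_iff_perm _ _).mpr pl,
      (PySem.List.sorted_id_eq_sorted_id_iff_perm _ _).mpr pm,
      (PySem.List.sorted_id_eq_sorted_id_iff_perm _ _).mpr pr]
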